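-- pv_equiv track=rewrite | github.com/Lee-3-8/CodingTest-Study | level3/자물쇠와_열쇠/희재.py | solution
-- ===== SOURCE A (Python) =====
-- def rotate(arr):
--     return list(zip(*arr[::-1]))
--
-- def padding(key_len, lock_len, lock):
--     pad = [[0] * (key_len * 2 + lock_len) for _ in range(key_len * 2 + lock_len)]
--     for i in range(lock_len):
--         for j in range(lock_len):
--             pad[key_len + i][key_len + j] = lock[i][j]
--     return pad
--
-- def pick(key, pad, right, bottom, attach):
--     attach = 1 if attach else -1
--     for i in range(len(key)):
--         for j in range(len(key)):
--             pad[bottom + i][right + j] += attach * key[i][j]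
--
-- def is_allright(pad, key_len, lock_len):
--     for i in range(lock_len):
--         for j in range(lock_len):
--             if pad[key_len + i][key_len + j] != 1:
--                 return False
--     return True
--
-- def solution(key, lock):
--     pad = padding(len(key), len(lock), lock)
--
--     for _ in range(4):
--         key = rotate(key)
--         for bottom in range(1, len(key) + len(lock)):
--             for right in range(1, len(key) + len(lock)):
--                 pick(key, pad, right, bottom, attach=True)
--                 if is_allright(pad, len(key), len(lock)):
--                     return True
--                 pick(key, pad, right, bottom, attach=False)
--
--     return False
-- ===== SOURCE B (Python) =====
-- def solution(key, lock):
--     # Mismatch-energy test: the key fits at an offset iff the sum of squared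
--     # residuals (lock[i][j] + contribution - 1)^2 over all lock cells is zero.
--     # Precompute the no-key base energy once; per offset, correct it by a sum
--     # over the overlapping KEY cells only.
--     n = len(lock)
--     base = 0
--     for row in lock:
--         for v in row[:n]:
--             base += (v - 1) ** 2
--     k = key
--     for _ in range(4):
--         k = [list(t) for t in zip(*k[::-1])]
--         m = len(k)
--         for bottom in range(1, m + n):
--             for right in range(1, m + n):
--                 s = base
--                 for ki in range(m):
--                     i = bottom + ki - m
--                     if 0 <= i < n:
--                         for kj in range(m):
--                             j = right + kj - m
--                             if 0 <= j < n:
--                                 kv = k[ki][kj]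
--                                 s += kv * (kv + 2 * (lock[i][j] - 1))
--                 if s == 0:
--                     return True
--     return False
-- ===== Notes on version B (the rewrite author's own statement) =====
-- stated objective: faster
-- what changed: B drops A's padded (2k+n)^2 mutable board with its attach/check-every-cell/detach cycle and instead runs a mismatch-energy test: it precomputes once the sum of squared residuals (lock-1)^2 of the bare lock and, per rotation and offset, corrects that single integer by a sum over the overlapping key cells only, declaring a fit exactly when the energy is zero, so the per-offset n^2 board rescan disappears. …
-- outside the precondition, e.g. on solution([[]], [[1, 1], [1, 1]]): A returns False, B returns True; on solution([[1, 1], [1, 1], [0, 0]], [[0]]): A returns True, B returns True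
import Mathlib
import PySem

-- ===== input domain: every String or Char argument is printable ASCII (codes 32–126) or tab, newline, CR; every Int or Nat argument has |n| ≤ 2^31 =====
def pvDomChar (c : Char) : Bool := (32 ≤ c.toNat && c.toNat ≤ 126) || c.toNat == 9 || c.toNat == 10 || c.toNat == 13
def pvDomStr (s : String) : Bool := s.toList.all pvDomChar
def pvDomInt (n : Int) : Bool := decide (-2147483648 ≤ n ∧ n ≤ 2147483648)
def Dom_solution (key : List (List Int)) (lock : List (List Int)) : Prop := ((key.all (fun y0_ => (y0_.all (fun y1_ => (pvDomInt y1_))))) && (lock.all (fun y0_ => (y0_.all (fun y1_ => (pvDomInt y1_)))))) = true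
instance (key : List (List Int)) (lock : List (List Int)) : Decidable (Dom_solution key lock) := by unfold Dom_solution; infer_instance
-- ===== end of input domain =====

-- B replaces A's padded mutable board with its attach / check-every-cell / detach cycle by a
-- mismatch-energy test: one precomputed sum of squared residuals of the bare lock, corrected per
-- rotation/offset by a sum over the overlapping key cells only; fit ⟺ the energy is zero
-- (objective: faster — it drops A's per-offset full-board rescan).

-- ===== PORT A =====

-- Python zip(*rows): truncates at the shortest row (headD is guarded by the isEmpty
-- test and tail [] = [], so this is exact zip semantics).
def zipGo : List Int → List (List Int) → List (List Int)
  | [], _ => []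
  | x :: xs, rest =>
    if rest.all (fun r => !r.isEmpty) then
      (x :: rest.map (fun r => r.headD 0)) :: zipGo xs (rest.map (fun r => r.tail))
    else []

def zipStar : List (List Int) → List (List Int)
  | [] => []
  | r0 :: rest => zipGo r0 rest

-- rotate(arr) = list(zip(*arr[::-1]))
def pyRot (arr : List (List Int)) : List (List Int) := zipStar arr.reverse

-- 2D read pad[i][j] (exact wherever Python does not raise; Pre_ excludes IndexError inputs)
def get2 (pad : List (List Int)) (i j : Nat) : Int := (pad.getD i []).getD j 0
-- 2D update pad[i][j] += v  /  pad[i][j] = v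
def add2 (pad : List (List Int)) (i j : Nat) (v : Int) : List (List Int) :=
  pad.modify i (fun row => row.modify j (fun x => x + v))
def set2 (pad : List (List Int)) (i j : Nat) (v : Int) : List (List Int) :=
  pad.modify i (fun row => row.set j v)

def padding (keyLen lockLen : Nat) (lock : List (List Int)) : List (List Int) :=
  (List.range lockLen).foldl (fun pad i =>
    (List.range lockLen).foldl (fun pad j =>
      set2 pad (keyLen + i) (keyLen + j) (get2 lock i j)) pad)
    (List.replicate (keyLen * 2 + lockLen) (List.replicate (keyLen * 2 + lockLen) (0 : Int)))

def pick (key : List (List Int)) (pad : List (List Int)) (right bottom : Nat)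
    (attach : Bool) : List (List Int) :=
  let a : Int := if attach then 1 else -1
  (List.range key.length).foldl (fun pad i =>
    (List.range key.length).foldl (fun pad j =>
      add2 pad (bottom + i) (right + j) (a * get2 key i j)) pad) pad

def isAllright (pad : List (List Int)) (keyLen lockLen : Nat) : Bool :=
  (List.range lockLen).all fun i => (List.range lockLen).all fun j =>
    get2 pad (keyLen + i) (keyLen + j) == 1

-- inner 'for right in range(1, len(key)+len(lock))' loop; none = early 'return True'
def innerA (key : List (List Int)) (lockLen b : Nat) :
    List Nat → List (List Int) → Option (List (List Int))
  | [], pad => some pad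
  | r :: rs, pad =>
    let pad1 := pick key pad r b true
    if isAllright pad1 key.length lockLen then none
    else innerA key lockLen b rs (pick key pad1 r b false)

-- middle 'for bottom in range(1, len(key)+len(lock))' loop
def midA (key : List (List Int)) (lockLen : Nat) :
    List Nat → List (List Int) → Option (List (List Int))
  | [], pad => some pad
  | b :: bs, pad =>
    match innerA key lockLen b (List.range' 1 (key.length + lockLen - 1)) pad with
    | none => none
    | some pad' => midA key lockLen bs pad'

-- outer 'for _ in range(4)' loop
def outerA (lockLen : Nat) : Nat → List (List Int) → List (List Int) → Bool
  | 0, _, _ => false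
  | t + 1, key, pad =>
    let key' := pyRot key
    match midA key' lockLen (List.range' 1 (key'.length + lockLen - 1)) pad with
    | none => true
    | some pad' => outerA lockLen t key' pad'

def solution (key : List (List Int)) (lock : List (List Int)) : Bool :=
  outerA lock.length 4 key (padding key.length lock.length lock)

-- ===== PORT B =====

-- base mismatch energy of the bare lock: sum of (v-1)^2 over the first n entries of each row
def baseSum (lock : List (List Int)) : Int :=
  lock.foldl (fun s row =>
    (row.take lock.length).foldl (fun s v => s + (v - 1) ^ 2) s) 0

-- per-offset energy: base corrected by kv*(kv+2*(lock-1)) over overlapping key cells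
def sCheck (k lock : List (List Int)) (b r : Nat) (base : Int) : Int :=
  (List.range k.length).foldl (fun (s : Int) (ki : Nat) =>
    if 0 ≤ (b : Int) + ki - k.length ∧ (b : Int) + ki - k.length < (lock.length : Int) then
      (List.range k.length).foldl (fun (s : Int) (kj : Nat) =>
        if 0 ≤ (r : Int) + kj - k.length ∧ (r : Int) + kj - k.length < (lock.length : Int) then
          s + get2 k ki kj *
            (get2 k ki kj +
              2 * (get2 lock ((b : Int) + ki - k.length).toNat
                     ((r : Int) + kj - k.length).toNat - 1))
        else s) s
    else s) base

def outerB (lock : List (List Int)) (base : Int) : Nat → List (List Int) → Bool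
  | 0, _ => false
  | t + 1, k =>
    let k' := pyRot k
    if (List.range' 1 (k'.length + lock.length - 1)).any (fun b =>
         (List.range' 1 (k'.length + lock.length - 1)).any (fun r =>
           sCheck k' lock b r base == 0))
    then true else outerB lock base t k'

def solution_alt (key : List (List Int)) (lock : List (List Int)) : Bool :=
  outerB lock (baseSum lock) 4 key

-- ===== PRECONDITION & SPEC =====
-- Pre_ excludes malformed (ragged) grids: locks with a row shorter than len(lock), on which A
-- raises IndexError while building the padded board, and ragged keys, which A's zip-rotation
-- silently collapses or truncates so that A raises IndexError on a later rotation or returns a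
-- value read off the wrong, zero-padded corner of its board — except that keys containing an
-- empty row stay admitted when the lock is not an all-ones grid of size ≥ 2 (there A and B both
-- return False); over an all-ones lock such a key is excluded, because A's collapsed key makes
-- it check the wrong corner and return False while B returns True, the intended overlay value.
def Pre_solution (key : List (List Int)) (lock : List (List Int)) : Prop :=
  (∀ r ∈ lock, lock.length ≤ r.length) ∧
  (key = [] ∨
    ([] ∈ key ∧ ¬(2 ≤ lock.length ∧
      lock.all (fun row => (row.take lock.length).all (fun v => v == 1)) = true)) ∨
    ((∀ r ∈ key, key.length ≤ r.length) ∧ ∃ r ∈ key, r.length = key.length))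
instance (key : List (List Int)) (lock : List (List Int)) : Decidable (Pre_solution key lock) := by
  unfold Pre_solution; infer_instance

def pvWitness_solution : List (List Int) × List (List Int) := ([[1]], [[0]])

def Spec_solution (key : List (List Int)) (lock : List (List Int)) (out : Bool) : Prop :=
  out = solution_alt key lock
instance (key : List (List Int)) (lock : List (List Int)) (out : Bool) :
    Decidable (Spec_solution key lock out) := by unfold Spec_solution; infer_instance

-- ===== CLAIM (what is proved, stated in full; the proofs are below) =====
def Claim_equal_solution : Prop := ∀ (key : List (List Int)) (lock : List (List Int)), Dom_solution key lock → Pre_solution key lock → Spec_solution key lock (solution key lock)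

-- ===== LEMMAS AND PROOFS =====

-- proof-side bridge: the cell-wise overlay condition both ports are compared against
def bCheck (k lock : List (List Int)) (b r : Nat) : Bool :=
  (List.range lock.length).all fun i => (List.range lock.length).all fun j =>
    (get2 lock i j +
      (if 0 ≤ (k.length : Int) + i - b ∧ (k.length : Int) + i - b < (k.length : Int) ∧
          0 ≤ (k.length : Int) + j - r ∧ (k.length : Int) + j - r < (k.length : Int)
       then get2 k ((k.length : Int) + i - b).toNat ((k.length : Int) + j - r).toNat
       else 0)) == 1

def Shape (N : Nat) (pad : List (List Int)) : Prop :=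
  pad.length = N ∧ ∀ row ∈ pad, row.length = N

def Exact (n : Nat) (k : List (List Int)) : Prop :=
  k.length = n ∧ ∀ r ∈ k, r.length = n

theorem shape_modify {N : Nat} {pad : List (List Int)} (i : Nat)
    (f : List Int → List Int) (hf : ∀ r, (f r).length = r.length)
    (h : Shape N pad) : Shape N (pad.modify i f) := by
  obtain ⟨h1, h2⟩ := h
  refine ⟨by simp [List.length_modify, h1], ?_⟩
  intro row hrow
  rw [List.mem_iff_getElem?] at hrow
  obtain ⟨j, hj⟩ := hrow
  rw [List.getElem?_modify] at hj
  cases hp : pad[j]? with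
  | none => rw [hp] at hj; simp at hj
  | some r =>
    rw [hp] at hj
    have hj2 : (if i = j then f r else r) = row := by simpa using hj
    clear hj
    have hj := hj2
    have hrl := h2 r (List.mem_of_getElem? hp)
    by_cases hij : i = j
    · rw [if_pos hij] at hj
      rw [← hj, hf]
      exact hrl
    · rw [if_neg hij] at hj
      rw [← hj]
      exact hrl

theorem shape_add2 {N : Nat} {pad : List (List Int)} {i j : Nat} {v : Int}
    (h : Shape N pad) : Shape N (add2 pad i j v) :=
  shape_modify i _ (fun r => by simp [List.length_modify]) h

theorem shape_set2 {N : Nat} {pad : List (List Int)} {i j : Nat} {v : Int}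
    (h : Shape N pad) : Shape N (set2 pad i j v) :=
  shape_modify i _ (fun r => by simp [List.length_set]) h

theorem getD_row {N : Nat} {pad : List (List Int)} (h : Shape N pad) {i : Nat}
    (hi : i < N) : ∃ row, pad[i]? = some row ∧ row.length = N := by
  obtain ⟨h1, h2⟩ := h
  have hlt : i < pad.length := by omega
  exact ⟨pad[i], List.getElem?_eq_getElem hlt, h2 _ (List.getElem_mem hlt)⟩

theorem get2_add2 {N : Nat} {pad : List (List Int)} {i j : Nat} {v : Int}
    (h : Shape N pad) (hi : i < N) (hj : j < N) (x y : Nat) :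
    get2 (add2 pad i j v) x y =
      if x = i ∧ y = j then get2 pad x y + v else get2 pad x y := by
  unfold add2 get2
  by_cases hxi : i = x
  · subst hxi
    obtain ⟨row, hrow, hlen⟩ := getD_row h hi
    have hrow' : pad.getD i [] = row := by
      rw [List.getD_eq_getElem?_getD, hrow]
      rfl
    have hmod : (pad.modify i fun r => r.modify j fun x0 => x0 + v).getD i []
        = row.modify j (fun x0 => x0 + v) := by
      simp [List.getD_eq_getElem?_getD, List.getElem?_modify, hrow]
    rw [hmod, hrow']
    by_cases hyj : y = j
    · subst hyj
      have hylt : y < row.length := by omega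
      rw [if_pos ⟨rfl, rfl⟩]
      simp [List.getD_eq_getElem?_getD, List.getElem?_modify,
        List.getElem?_eq_getElem hylt]
    · have hyj' : ¬ j = y := fun hcc => hyj hcc.symm
      rw [if_neg (fun hcc => hyj hcc.2)]
      simp [List.getD_eq_getElem?_getD, List.getElem?_modify, hyj']
  · rw [if_neg (fun hcc => hxi hcc.1.symm)]
    simp [List.getD_eq_getElem?_getD, List.getElem?_modify, hxi]

theorem get2_set2 {N : Nat} {pad : List (List Int)} {i j : Nat} {v : Int}
    (h : Shape N pad) (hi : i < N) (hj : j < N) (x y : Nat) :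
    get2 (set2 pad i j v) x y =
      if x = i ∧ y = j then v else get2 pad x y := by
  unfold set2 get2
  by_cases hxi : i = x
  · subst hxi
    obtain ⟨row, hrow, hlen⟩ := getD_row h hi
    have hrow' : pad.getD i [] = row := by
      rw [List.getD_eq_getElem?_getD, hrow]
      rfl
    have hmod : (pad.modify i fun r => r.set j v).getD i [] = row.set j v := by
      simp [List.getD_eq_getElem?_getD, List.getElem?_modify, hrow]
    rw [hmod, hrow']
    by_cases hyj : y = j
    · subst hyj
      have hylt : y < row.length := by omega
      rw [if_pos ⟨rfl, rfl⟩]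
      simp [List.getD_eq_getElem?_getD, List.getElem?_set, hylt]
    · have hyj' : ¬ j = y := fun hcc => hyj hcc.symm
      rw [if_neg (fun hcc => hyj hcc.2)]
      simp [List.getD_eq_getElem?_getD, List.getElem?_set, hyj']
  · rw [if_neg (fun hcc => hxi hcc.1.symm)]
    simp [List.getD_eq_getElem?_getD, List.getElem?_modify, hxi]

theorem shape_base {N : Nat} :
    Shape N (List.replicate N (List.replicate N (0 : Int))) := by
  refine ⟨by simp, ?_⟩
  intro row hrow
  rw [List.eq_of_mem_replicate hrow]
  simp

theorem get2_base {N : Nat} (x y : Nat) :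
    get2 (List.replicate N (List.replicate N (0 : Int))) x y = 0 := by
  unfold get2
  rw [List.getD_eq_getElem?_getD (l := List.replicate N (List.replicate N (0 : Int)))
    (i := x), List.getElem?_replicate]
  by_cases hx : x < N
  · rw [if_pos hx, Option.getD_some,
      List.getD_eq_getElem?_getD (l := List.replicate N (0 : Int)) (i := y),
      List.getElem?_replicate]
    by_cases hy : y < N
    · rw [if_pos hy]
      rfl
    · rw [if_neg hy]
      rfl
  · rw [if_neg hx]
    rfl

theorem get2_eq_getElem {p : List (List Int)} {i j : Nat} (h1 : i < p.length)
    (h2 : j < p[i].length) : get2 p i j = p[i][j] := by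
  unfold get2
  rw [List.getD_eq_getElem?_getD (l := p) (i := i), List.getElem?_eq_getElem h1,
    Option.getD_some, List.getD_eq_getElem?_getD (l := p[i]) (i := j),
    List.getElem?_eq_getElem h2, Option.getD_some]

theorem eq_of_get2 {N : Nat} {p q : List (List Int)} (hp : Shape N p) (hq : Shape N q)
    (h : ∀ x y, get2 p x y = get2 q x y) : p = q := by
  apply List.ext_getElem (hp.1.trans hq.1.symm)
  intro i h1 h2
  apply List.ext_getElem
    ((hp.2 _ (List.getElem_mem h1)).trans (hq.2 _ (List.getElem_mem h2)).symm)
  intro j hj1 hj2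
  have hh := h i j
  rw [get2_eq_getElem h1 hj1, get2_eq_getElem h2 hj2] at hh
  exact hh

-- one row of assignments of padding
theorem pad_inner {N K : Nat} (lock : List (List Int)) (i : Nat) (hKi : K + i < N) :
    ∀ (c : Nat), K + c ≤ N → ∀ (p : List (List Int)), Shape N p →
    Shape N ((List.range c).foldl
        (fun pad j => set2 pad (K + i) (K + j) (get2 lock i j)) p) ∧
    ∀ x y, get2 ((List.range c).foldl
        (fun pad j => set2 pad (K + i) (K + j) (get2 lock i j)) p) x y =
      if x = K + i ∧ K ≤ y ∧ y < K + c then get2 lock i (y - K) else get2 p x y := by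
  intro c
  induction c with
  | zero =>
    intro _ p hp
    refine ⟨hp, ?_⟩
    intro x y
    rw [if_neg (by omega)]
    rfl
  | succ c ih =>
    intro hc p hp
    obtain ⟨ihS, ihG⟩ := ih (by omega) p hp
    rw [List.range_succ, List.foldl_append]
    refine ⟨by simpa using shape_set2 ihS, ?_⟩
    intro x y
    simp only [List.foldl_cons, List.foldl_nil]
    rw [get2_set2 ihS hKi (by omega), ihG]
    by_cases hx : x = K + i
    · by_cases hy : y = K + c
      · rw [if_pos ⟨hx, hy⟩, if_pos ⟨hx, by omega, by omega⟩]
        congr 1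
        omega
      · rw [if_neg (by omega)]
        by_cases hy2 : K ≤ y ∧ y < K + c
        · rw [if_pos ⟨hx, hy2.1, hy2.2⟩, if_pos ⟨hx, hy2.1, by omega⟩]
        · rw [if_neg (by omega), if_neg (by omega)]
    · rw [if_neg (by omega), if_neg (by omega), if_neg (by omega)]

theorem pad_outer {N K : Nat} (lock : List (List Int)) (L : Nat) (hKL : K + L ≤ N) :
    ∀ (t : Nat), t ≤ L → ∀ (p : List (List Int)), Shape N p →
    Shape N ((List.range t).foldl (fun pad i =>
        (List.range L).foldl
          (fun pad j => set2 pad (K + i) (K + j) (get2 lock i j)) pad) p) ∧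
    ∀ x y, get2 ((List.range t).foldl (fun pad i =>
        (List.range L).foldl
          (fun pad j => set2 pad (K + i) (K + j) (get2 lock i j)) pad) p) x y =
      if K ≤ x ∧ x < K + t ∧ K ≤ y ∧ y < K + L then get2 lock (x - K) (y - K)
      else get2 p x y := by
  intro t
  induction t with
  | zero =>
    intro _ p hp
    refine ⟨hp, ?_⟩
    intro x y
    rw [if_neg (by omega)]
    rfl
  | succ t ih =>
    intro ht p hp
    obtain ⟨ihS, ihG⟩ := ih (by omega) p hp
    rw [List.range_succ, List.foldl_append]
    obtain ⟨rowS, rowG⟩ := pad_inner (N := N) (K := K) lock t (by omega) L (by omega) _ ihS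
    refine ⟨by simpa using rowS, ?_⟩
    intro x y
    simp only [List.foldl_cons, List.foldl_nil]
    rw [rowG, ihG]
    by_cases hx : x = K + t
    · by_cases hy : K ≤ y ∧ y < K + L
      · rw [if_pos ⟨hx, hy.1, hy.2⟩, if_pos ⟨by omega, by omega, hy.1, hy.2⟩]
        congr 1
        omega
      · rw [if_neg (by omega), if_neg (by omega), if_neg (by omega)]
    · rw [if_neg (by omega)]
      by_cases hx2 : K ≤ x ∧ x < K + t ∧ K ≤ y ∧ y < K + L
      · rw [if_pos hx2, if_pos ⟨hx2.1, by omega, hx2.2.2⟩]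
      · rw [if_neg hx2, if_neg (by omega)]

theorem padding_char (K : Nat) (lock : List (List Int)) :
    Shape (K * 2 + lock.length) (padding K lock.length lock) ∧
    ∀ x y, get2 (padding K lock.length lock) x y =
      if K ≤ x ∧ x < K + lock.length ∧ K ≤ y ∧ y < K + lock.length
      then get2 lock (x - K) (y - K) else 0 := by
  obtain ⟨hS, hG⟩ := pad_outer (N := K * 2 + lock.length) (K := K) lock lock.length
    (by omega) lock.length le_rfl _ (shape_base)
  refine ⟨hS, ?_⟩
  intro x y
  unfold padding
  rw [hG, get2_base]

-- one row of additions of pick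
theorem pick_inner {N : Nat} (k : List (List Int)) (a : Int) (b r i : Nat)
    (hbi : b + i < N) :
    ∀ (c : Nat), r + c ≤ N → ∀ (p : List (List Int)), Shape N p →
    Shape N ((List.range c).foldl
        (fun pad j => add2 pad (b + i) (r + j) (a * get2 k i j)) p) ∧
    ∀ x y, get2 ((List.range c).foldl
        (fun pad j => add2 pad (b + i) (r + j) (a * get2 k i j)) p) x y =
      get2 p x y +
        (if x = b + i ∧ r ≤ y ∧ y < r + c then a * get2 k i (y - r) else 0) := by
  intro c
  induction c with
  | zero =>
    intro _ p hp
    refine ⟨hp, ?_⟩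
    intro x y
    rw [if_neg (by omega)]
    simp
  | succ c ih =>
    intro hc p hp
    obtain ⟨ihS, ihG⟩ := ih (by omega) p hp
    rw [List.range_succ, List.foldl_append]
    refine ⟨by simpa using shape_add2 ihS, ?_⟩
    intro x y
    simp only [List.foldl_cons, List.foldl_nil]
    rw [get2_add2 ihS hbi (by omega), ihG]
    by_cases hx : x = b + i
    · by_cases hy : y = r + c
      · rw [if_pos ⟨hx, hy⟩, if_neg (by omega), if_pos ⟨hx, by omega, by omega⟩]
        have hyr : y - r = c := by omega
        rw [hyr]
        ring
      · rw [if_neg (by omega)]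
        by_cases hy2 : r ≤ y ∧ y < r + c
        · rw [if_pos ⟨hx, hy2.1, hy2.2⟩, if_pos ⟨hx, hy2.1, by omega⟩]
        · rw [if_neg (by omega), if_neg (by omega)]
    · rw [if_neg (by omega), if_neg (by omega), if_neg (by omega)]

theorem pick_outer {N : Nat} (k : List (List Int)) (a : Int) (b r : Nat)
    (hb : b + k.length ≤ N) (hr : r + k.length ≤ N) :
    ∀ (t : Nat), t ≤ k.length → ∀ (p : List (List Int)), Shape N p →
    Shape N ((List.range t).foldl (fun pad i =>
        (List.range k.length).foldl
          (fun pad j => add2 pad (b + i) (r + j) (a * get2 k i j)) pad) p) ∧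
    ∀ x y, get2 ((List.range t).foldl (fun pad i =>
        (List.range k.length).foldl
          (fun pad j => add2 pad (b + i) (r + j) (a * get2 k i j)) pad) p) x y =
      get2 p x y +
        (if b ≤ x ∧ x < b + t ∧ r ≤ y ∧ y < r + k.length
         then a * get2 k (x - b) (y - r) else 0) := by
  intro t
  induction t with
  | zero =>
    intro _ p hp
    refine ⟨hp, ?_⟩
    intro x y
    rw [if_neg (by omega)]
    simp
  | succ t ih =>
    intro ht p hp
    obtain ⟨ihS, ihG⟩ := ih (by omega) p hp
    rw [List.range_succ, List.foldl_append]
    obtain ⟨rowS, rowG⟩ := pick_inner (N := N) k a b r t (by omega) k.length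
      (by omega) _ ihS
    refine ⟨by simpa using rowS, ?_⟩
    intro x y
    simp only [List.foldl_cons, List.foldl_nil]
    rw [rowG, ihG]
    by_cases hx : x = b + t
    · by_cases hy : r ≤ y ∧ y < r + k.length
      · rw [if_neg (by omega), if_pos ⟨hx, hy.1, hy.2⟩,
            if_pos ⟨by omega, by omega, hy.1, hy.2⟩]
        have hxb : x - b = t := by omega
        rw [hxb]
        ring
      · rw [if_neg (by omega), if_neg (by omega), if_neg (by omega)]
        simp
    · by_cases hx2 : b ≤ x ∧ x < b + t ∧ r ≤ y ∧ y < r + k.length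
      · rw [if_pos hx2, if_neg (by omega), if_pos ⟨hx2.1, by omega, hx2.2.2⟩]
        ring
      · rw [if_neg hx2, if_neg (by omega), if_neg (by omega)]
        simp

theorem pick_char {N : Nat} (k p : List (List Int)) (hp : Shape N p) (att : Bool)
    (b r : Nat) (hb : b + k.length ≤ N) (hr : r + k.length ≤ N) :
    Shape N (pick k p r b att) ∧
    ∀ x y, get2 (pick k p r b att) x y =
      get2 p x y +
        (if b ≤ x ∧ x < b + k.length ∧ r ≤ y ∧ y < r + k.length
         then (if att then (1 : Int) else -1) * get2 k (x - b) (y - r) else 0) := by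
  obtain ⟨hS, hG⟩ := pick_outer (N := N) k (if att then (1 : Int) else -1) b r hb hr
    k.length le_rfl p hp
  exact ⟨hS, fun x y => by rw [pick]; exact hG x y⟩

theorem pick_unpick {N : Nat} (k p : List (List Int)) (hp : Shape N p) (b r : Nat)
    (hb : b + k.length ≤ N) (hr : r + k.length ≤ N) :
    pick k (pick k p r b true) r b false = p := by
  obtain ⟨hs1, hg1⟩ := pick_char (N := N) k p hp true b r hb hr
  obtain ⟨hs2, hg2⟩ := pick_char (N := N) k _ hs1 false b r hb hr
  apply eq_of_get2 hs2 hp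
  intro x y
  rw [hg2, hg1]
  have e1 : (if true = true then (1 : Int) else -1) = 1 := rfl
  have e2 : (if false = true then (1 : Int) else -1) = -1 := rfl
  rw [e1, e2]
  split_ifs <;> ring

theorem all_congr {α : Type} {l : List α} {p q : α → Bool}
    (h : ∀ x ∈ l, p x = q x) : l.all p = l.all q := by
  induction l with
  | nil => rfl
  | cons a l ih =>
    simp only [List.all_cons, h a (by simp), ih (fun x hx => h x (by simp [hx]))]

-- the central pointwise fact: A's board check after attaching the key at (b, r)
-- equals the cell-wise overlay condition bCheck
theorem check_eq {K : Nat} (k lock : List (List Int)) (hk : Exact K k)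
    {b r : Nat} (hb : 1 ≤ b ∧ b < K + lock.length) (hr : 1 ≤ r ∧ r < K + lock.length) :
    isAllright (pick k (padding K lock.length lock) r b true) k.length lock.length
      = bCheck k lock b r := by
  obtain ⟨hkl, _⟩ := hk
  subst hkl
  obtain ⟨hpS, hpG⟩ := padding_char k.length lock
  obtain ⟨hS, hG⟩ := pick_char (N := k.length * 2 + lock.length) k _ hpS true b r
    (by omega) (by omega)
  unfold isAllright bCheck
  apply all_congr
  intro i hi
  rw [List.mem_range] at hi
  apply all_congr
  intro j hj
  rw [List.mem_range] at hj
  have hreg : get2 (padding k.length lock.length lock) (k.length + i) (k.length + j)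
      = get2 lock i j := by
    rw [hpG, if_pos ⟨by omega, by omega, by omega, by omega⟩]
    congr 1 <;> omega
  rw [hG, hreg]
  have e1 : (if true = true then (1 : Int) else -1) = 1 := rfl
  rw [e1]
  congr 1
  congr 1
  by_cases hcond : b ≤ k.length + i ∧ k.length + i < b + k.length ∧
      r ≤ k.length + j ∧ k.length + j < r + k.length
  · rw [if_pos hcond, if_pos (by refine ⟨?_, ?_, ?_, ?_⟩ <;> omega)]
    have h1 : ((k.length : Int) + i - b).toNat = k.length + i - b := by omega
    have h2 : ((k.length : Int) + j - r).toNat = k.length + j - r := by omega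
    rw [h1, h2, one_mul]
  · rw [if_neg hcond, if_neg (by
      intro hcc
      obtain ⟨c1, c2, c3, c4⟩ := hcc
      exact hcond ⟨by omega, by omega, by omega, by omega⟩)]

theorem innerA_eq {K : Nat} (k lock : List (List Int)) (hk : Exact K k)
    (b : Nat) (hb : 1 ≤ b ∧ b < K + lock.length) :
    ∀ rs, (∀ r ∈ rs, 1 ≤ r ∧ r < K + lock.length) →
    innerA k lock.length b rs (padding K lock.length lock) =
      if rs.any (fun r => bCheck k lock b r) then none
      else some (padding K lock.length lock) := by
  intro rs
  induction rs with
  | nil => intro _; simp [innerA]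
  | cons r rs ih =>
    intro hmem
    have hr := hmem r (by simp)
    have hchk := check_eq k lock hk hb hr
    have hundo : pick k (pick k (padding K lock.length lock) r b true) r b false =
        padding K lock.length lock := by
      have hpS := (padding_char K lock).1
      exact pick_unpick (N := K * 2 + lock.length) k _ hpS b r
        (by obtain ⟨hkl, _⟩ := hk; omega) (by obtain ⟨hkl, _⟩ := hk; omega)
    by_cases hc : bCheck k lock b r = true
    · simp [innerA, hchk, hc]
    · rw [Bool.not_eq_true] at hc
      simp only [innerA, hchk, hc, Bool.false_eq_true, if_false, hundo,
        List.any_cons, Bool.false_or]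
      exact ih (fun r' hr' => hmem r' (by simp [hr']))

theorem midA_eq {K : Nat} (k lock : List (List Int)) (hk : Exact K k) :
    ∀ bs, (∀ b ∈ bs, 1 ≤ b ∧ b < K + lock.length) →
    midA k lock.length bs (padding K lock.length lock) =
      if bs.any (fun b => (List.range' 1 (k.length + lock.length - 1)).any
          (fun r => bCheck k lock b r)) then none
      else some (padding K lock.length lock) := by
  intro bs
  induction bs with
  | nil => intro _; simp [midA]
  | cons b bs ih =>
    intro hmem
    have hb := hmem b (by simp)
    have hrng : ∀ r ∈ List.range' 1 (k.length + lock.length - 1),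
        1 ≤ r ∧ r < K + lock.length := by
      intro r hrr
      rw [List.mem_range'_1] at hrr
      obtain ⟨hkl, _⟩ := hk
      omega
    have hin := innerA_eq k lock hk b hb _ hrng
    by_cases hc : (List.range' 1 (k.length + lock.length - 1)).any
        (fun r => bCheck k lock b r) = true
    · simp [midA, hin, hc]
    · rw [Bool.not_eq_true] at hc
      simp only [midA, hin, hc, Bool.false_eq_true, if_false, List.any_cons,
        Bool.false_or]
      exact ih (fun b' hb' => hmem b' (by simp [hb']))

-- ===== B-side characterisation: the energy is the sum of squared residuals =====

theorem sum_list_range (n : Nat) (f : Nat → Int) :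
    ((List.range n).map f).sum = ∑ i ∈ Finset.range n, f i := rfl

theorem sum_map_getD {α : Type} (l : List α) (d : α) (g : α → Int) :
    (l.map g).sum = ∑ j ∈ Finset.range l.length, g (l.getD j d) := by
  induction l with
  | nil => simp
  | cons a l ih =>
    rw [List.map_cons, List.sum_cons, List.length_cons, Finset.sum_range_succ']
    simp only [List.getD_cons_succ, List.getD_cons_zero]
    rw [← ih]
    exact add_comm _ _

-- index shift: a sum over key indices with an in-lock guard equals the sum over lock
-- indices with an in-key guard
theorem shift_sum (m n b : Nat) (F : Nat → Nat → Int) :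
    (∑ a ∈ Finset.range m, if 0 ≤ (b : Int) + a - m ∧ (b : Int) + a - m < (n : Int)
        then F a ((b : Int) + a - m).toNat else 0)
    = ∑ t ∈ Finset.range n, if 0 ≤ (m : Int) + t - b ∧ (m : Int) + t - b < (m : Int)
        then F ((m : Int) + t - b).toNat t else 0 := by
  rw [← Finset.sum_filter, ← Finset.sum_filter]
  refine Finset.sum_nbij' (fun a => ((b : Int) + a - m).toNat)
    (fun t => ((m : Int) + t - b).toNat) ?_ ?_ ?_ ?_ ?_
  · intro a ha
    simp only [Finset.mem_filter, Finset.mem_range] at *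
    try dsimp only
    omega
  · intro t ht
    simp only [Finset.mem_filter, Finset.mem_range] at *
    try dsimp only
    omega
  · intro a ha
    simp only [Finset.mem_filter, Finset.mem_range] at ha
    try dsimp only
    omega
  · intro t ht
    simp only [Finset.mem_filter, Finset.mem_range] at ht
    try dsimp only
    omega
  · intro a ha
    simp only [Finset.mem_filter, Finset.mem_range] at ha
    dsimp only
    have hrw : ((m : Int) + (((b : Int) + a - m).toNat : Int) - b).toNat = a := by omega
    rw [hrw]

theorem baseSum_eq (lock : List (List Int)) (hlock : ∀ r ∈ lock, lock.length ≤ r.length) :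
    baseSum lock = ∑ i ∈ Finset.range lock.length, ∑ j ∈ Finset.range lock.length,
      (get2 lock i j - 1) ^ 2 := by
  unfold baseSum
  rw [PySem.List.foldl_congr_mem' lock _
    (fun s row => s + ((row.take lock.length).map (fun v => (v - 1) ^ 2)).sum) 0
    (fun row _ acc => PySem.List.foldl_add _ _ _)]
  rw [PySem.List.foldl_add, zero_add]
  rw [sum_map_getD lock ([] : List Int) _]
  apply Finset.sum_congr rfl
  intro i hi
  rw [Finset.mem_range] at hi
  have hrow : lock.getD i [] ∈ lock := by
    rw [List.getD_eq_getElem?_getD, List.getElem?_eq_getElem hi, Option.getD_some]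
    exact List.getElem_mem hi
  have hlen : lock.length ≤ (lock.getD i []).length := hlock _ hrow
  rw [sum_map_getD _ (0 : Int) _]
  have htk : ((lock.getD i []).take lock.length).length = lock.length := by
    rw [List.length_take]
    omega
  rw [htk]
  apply Finset.sum_congr rfl
  intro j hj
  rw [Finset.mem_range] at hj
  have hget : ((lock.getD i []).take lock.length).getD j 0
      = (lock.getD i []).getD j 0 := by
    simp [List.getD_eq_getElem?_getD, List.getElem?_take_of_lt hj]
  rw [hget]
  rfl

theorem sCheck_eq (k lock : List (List Int))
    (hlock : ∀ r ∈ lock, lock.length ≤ r.length) (b r : Nat) :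
    sCheck k lock b r (baseSum lock) =
      ∑ i ∈ Finset.range lock.length, ∑ j ∈ Finset.range lock.length,
        (get2 lock i j +
          (if 0 ≤ (k.length : Int) + i - b ∧ (k.length : Int) + i - b < (k.length : Int) ∧
              0 ≤ (k.length : Int) + j - r ∧ (k.length : Int) + j - r < (k.length : Int)
           then get2 k ((k.length : Int) + i - b).toNat ((k.length : Int) + j - r).toNat
           else 0) - 1) ^ 2 := by
  unfold sCheck
  have hin : ∀ (ki : Nat) (s : Int),
      (List.range k.length).foldl (fun (s : Int) (kj : Nat) =>
        if 0 ≤ (r : Int) + kj - k.length ∧ (r : Int) + kj - k.length < (lock.length : Int) then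
          s + get2 k ki kj *
            (get2 k ki kj +
              2 * (get2 lock ((b : Int) + ki - k.length).toNat
                     ((r : Int) + kj - k.length).toNat - 1))
        else s) s
      = s + ((List.range k.length).map (fun (kj : Nat) =>
          if 0 ≤ (r : Int) + kj - k.length ∧ (r : Int) + kj - k.length < (lock.length : Int) then
            get2 k ki kj *
              (get2 k ki kj +
                2 * (get2 lock ((b : Int) + ki - k.length).toNat
                       ((r : Int) + kj - k.length).toNat - 1))
          else 0)).sum := by
    intro ki s
    rw [PySem.List.foldl_congr_mem' (List.range k.length) _
      (fun (s : Int) (kj : Nat) => s +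
        (if 0 ≤ (r : Int) + kj - k.length ∧ (r : Int) + kj - k.length < (lock.length : Int) then
          get2 k ki kj *
            (get2 k ki kj +
              2 * (get2 lock ((b : Int) + ki - k.length).toNat
                     ((r : Int) + kj - k.length).toNat - 1))
        else 0)) s
      (fun kj _ acc => by
        try simp only []
        by_cases hg : 0 ≤ (r : Int) + kj - k.length ∧ (r : Int) + kj - k.length < (lock.length : Int)
        · rw [if_pos hg, if_pos hg]
        · rw [if_neg hg, if_neg hg, add_zero])]
    exact PySem.List.foldl_add _ _ _
  rw [PySem.List.foldl_congr_mem' (List.range k.length) _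
    (fun (s : Int) (ki : Nat) => s +
      (if 0 ≤ (b : Int) + ki - k.length ∧ (b : Int) + ki - k.length < (lock.length : Int) then
        ((List.range k.length).map (fun (kj : Nat) =>
          if 0 ≤ (r : Int) + kj - k.length ∧ (r : Int) + kj - k.length < (lock.length : Int) then
            get2 k ki kj *
              (get2 k ki kj +
                2 * (get2 lock ((b : Int) + ki - k.length).toNat
                       ((r : Int) + kj - k.length).toNat - 1))
          else 0)).sum
      else 0)) (baseSum lock)
    (fun ki _ acc => by
      try simp only []
      by_cases hg : 0 ≤ (b : Int) + ki - k.length ∧ (b : Int) + ki - k.length < (lock.length : Int)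
      · rw [if_pos hg, if_pos hg, hin ki acc]
      · rw [if_neg hg, if_neg hg, add_zero])]
  rw [PySem.List.foldl_add, sum_list_range]
  rw [shift_sum k.length lock.length b (fun a i =>
    ((List.range k.length).map (fun (kj : Nat) =>
      if 0 ≤ (r : Int) + kj - k.length ∧ (r : Int) + kj - k.length < (lock.length : Int) then
        get2 k a kj *
          (get2 k a kj + 2 * (get2 lock i ((r : Int) + kj - k.length).toNat - 1))
      else 0)).sum)]
  rw [baseSum_eq lock hlock, ← Finset.sum_add_distrib]
  apply Finset.sum_congr rfl
  intro i hi
  have hF : (if 0 ≤ (k.length : Int) + i - b ∧ (k.length : Int) + i - b < (k.length : Int)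
      then ((List.range k.length).map (fun (kj : Nat) =>
        if 0 ≤ (r : Int) + kj - k.length ∧ (r : Int) + kj - k.length < (lock.length : Int) then
          get2 k ((k.length : Int) + i - b).toNat kj *
            (get2 k ((k.length : Int) + i - b).toNat kj +
              2 * (get2 lock i ((r : Int) + kj - k.length).toNat - 1))
        else 0)).sum
      else 0)
      = ∑ j ∈ Finset.range lock.length,
        (if (0 ≤ (k.length : Int) + i - b ∧ (k.length : Int) + i - b < (k.length : Int)) ∧
            (0 ≤ (k.length : Int) + j - r ∧ (k.length : Int) + j - r < (k.length : Int)) then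
          get2 k ((k.length : Int) + i - b).toNat ((k.length : Int) + j - r).toNat *
            (get2 k ((k.length : Int) + i - b).toNat ((k.length : Int) + j - r).toNat +
              2 * (get2 lock i j - 1))
        else 0) := by
    split
    case isTrue h1 =>
      rw [sum_list_range]
      rw [shift_sum k.length lock.length r (fun a j =>
        get2 k ((k.length : Int) + i - b).toNat a *
          (get2 k ((k.length : Int) + i - b).toNat a + 2 * (get2 lock i j - 1)))]
      apply Finset.sum_congr rfl
      intro j _
      by_cases h2 : 0 ≤ (k.length : Int) + j - r ∧ (k.length : Int) + j - r < (k.length : Int)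
      · rw [if_pos h2, if_pos ⟨h1, h2⟩]
      · rw [if_neg h2, if_neg (fun hc => h2 hc.2)]
    case isFalse h1 =>
      symm
      apply Finset.sum_eq_zero
      intro j _
      rw [if_neg (fun hc => h1 hc.1)]
  rw [hF, ← Finset.sum_add_distrib]
  apply Finset.sum_congr rfl
  intro j hj
  have hiff : (0 ≤ (k.length : Int) + i - b ∧ (k.length : Int) + i - b < (k.length : Int) ∧
      0 ≤ (k.length : Int) + j - r ∧ (k.length : Int) + j - r < (k.length : Int)) ↔
      ((0 ≤ (k.length : Int) + i - b ∧ (k.length : Int) + i - b < (k.length : Int)) ∧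
      (0 ≤ (k.length : Int) + j - r ∧ (k.length : Int) + j - r < (k.length : Int))) := by
    tauto
  by_cases hc : (0 ≤ (k.length : Int) + i - b ∧ (k.length : Int) + i - b < (k.length : Int)) ∧
      (0 ≤ (k.length : Int) + j - r ∧ (k.length : Int) + j - r < (k.length : Int))
  · rw [if_pos hc, if_pos (hiff.mpr hc)]
    ring
  · rw [if_neg hc, if_neg (fun hh => hc (hiff.mp hh))]
    ring

-- B's zero-energy test coincides with the cell-wise overlay check
theorem sCheck_bool (k lock : List (List Int))
    (hlock : ∀ r ∈ lock, lock.length ≤ r.length) (b r : Nat) :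
    (sCheck k lock b r (baseSum lock) == 0) = bCheck k lock b r := by
  rw [Bool.eq_iff_iff, beq_iff_eq, sCheck_eq k lock hlock b r]
  unfold bCheck
  rw [Finset.sum_eq_zero_iff_of_nonneg
    (fun i _ => Finset.sum_nonneg (fun j _ => sq_nonneg _))]
  simp only [List.all_eq_true, List.mem_range, Finset.mem_range, beq_iff_eq]
  constructor
  · intro h i hi j hj
    have h1 := h i hi
    rw [Finset.sum_eq_zero_iff_of_nonneg (fun j _ => sq_nonneg _)] at h1
    have h2 := sq_eq_zero_iff.mp (h1 j (Finset.mem_range.mpr hj))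
    omega
  · intro h i hi
    apply Finset.sum_eq_zero
    intro j hj
    rw [Finset.mem_range] at hj
    have h2 := h i hi j hj
    apply sq_eq_zero_iff.mpr
    omega

-- zip shape lemmas
theorem zipGo_rows : ∀ (xs : List Int) (rest : List (List Int)) (r : List Int),
    r ∈ zipGo xs rest → r.length = rest.length + 1
  | [], _, _, h => by simp [zipGo] at h
  | x :: xs, rest, r, h => by
    rw [zipGo] at h
    by_cases hg : rest.all (fun r => !r.isEmpty) = true
    · rw [if_pos hg] at h
      rcases List.mem_cons.mp h with h1 | h1
      · subst h1
        simp
      · have := zipGo_rows xs (rest.map (fun r => r.tail)) r h1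
        simpa using this
    · rw [Bool.not_eq_true] at hg
      rw [hg] at h
      simp at h

theorem zipGo_length : ∀ (n : Nat) (xs : List Int) (rest : List (List Int)),
    (∀ r ∈ rest, n ≤ r.length) → n ≤ xs.length →
    (xs.length = n ∨ ∃ r ∈ rest, r.length = n) → (zipGo xs rest).length = n := by
  intro n
  induction n with
  | zero =>
    intro xs rest hall hxs hdis
    rcases hdis with h | ⟨r, hrmem, hr0⟩
    · have : xs = [] := List.eq_nil_of_length_eq_zero h
      subst this
      rfl
    · cases xs with
      | nil => rfl
      | cons x xs' =>
        have hfalse : rest.all (fun r => !r.isEmpty) = false := by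
          rw [List.all_eq_false]
          refine ⟨r, hrmem, ?_⟩
          simp [List.eq_nil_of_length_eq_zero hr0]
        rw [zipGo, hfalse]
        simp
  | succ n ih =>
    intro xs rest hall hxs hdis
    cases xs with
    | nil => simp at hxs
    | cons x xs' =>
      have hguard : rest.all (fun r => !r.isEmpty) = true := by
        rw [List.all_eq_true]
        intro r hrmem
        have := hall r hrmem
        simp
        intro hcon
        subst hcon
        simp at this
      rw [zipGo, if_pos hguard]
      simp only [List.length_cons]
      congr 1
      apply ih
      · intro r' hr'
        rw [List.mem_map] at hr'
        obtain ⟨r, hrmem, hre⟩ := hr'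
        subst hre
        have := hall r hrmem
        simp
        omega
      · simpa using hxs
      · rcases hdis with h | ⟨r, hrmem, hrl⟩
        · left
          simpa using h
        · right
          exact ⟨r.tail, List.mem_map.mpr ⟨r, hrmem, rfl⟩, by simp; omega⟩

theorem pyRot_nil : pyRot [] = [] := rfl

theorem pyRot_exact_of (key : List (List Int)) (hne : key ≠ [])
    (hall : ∀ r ∈ key, key.length ≤ r.length)
    (hex : ∃ r ∈ key, r.length = key.length) :
    Exact key.length (pyRot key) := by
  unfold pyRot
  cases hrev : key.reverse with
  | nil =>
    exact absurd (by simpa using congrArg List.length hrev) (by simp [hne])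
  | cons r0 rest =>
    have hmem0 : r0 ∈ key := by
      rw [← List.mem_reverse, hrev]; simp
    have hmemrest : ∀ r ∈ rest, r ∈ key := by
      intro r hr
      rw [← List.mem_reverse, hrev]
      simp [hr]
    have hlenrev : rest.length + 1 = key.length := by
      have := congrArg List.length hrev
      simp at this
      omega
    constructor
    · show (zipGo r0 rest).length = key.length
      apply zipGo_length key.length
      · intro r hr
        exact hall r (hmemrest r hr)
      · exact hall r0 hmem0
      · obtain ⟨r, hrmem, hrl⟩ := hex
        have : r ∈ r0 :: rest := by
          rw [← hrev, List.mem_reverse]; exact hrmem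
        rcases List.mem_cons.mp this with h | h
        · left; rw [← h]; exact hrl
        · right; exact ⟨r, h, hrl⟩
    · intro r hr
      have := zipGo_rows r0 rest r hr
      omega

theorem pyRot_exact {K : Nat} {k : List (List Int)} (h : Exact K k) :
    Exact K (pyRot k) := by
  obtain ⟨h1, h2⟩ := h
  cases k with
  | nil =>
    simp at h1
    subst h1
    exact ⟨rfl, by intro r hr; simp [pyRot_nil] at hr⟩
  | cons a l =>
    have := pyRot_exact_of (a :: l) (by simp)
      (fun r hr => by rw [h1, h2 r hr]) ⟨a, by simp, by rw [h1]; exact h2 a (by simp)⟩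
    rwa [h1] at this

-- the main per-rotation equivalence
theorem outer_eq {K : Nat} (lock : List (List Int))
    (hlock : ∀ r ∈ lock, lock.length ≤ r.length) :
    ∀ (t : Nat) (key : List (List Int)), Exact K (pyRot key) →
    outerA lock.length t key (padding K lock.length lock)
      = outerB lock (baseSum lock) t key := by
  intro t
  induction t with
  | zero => intro key _; rfl
  | succ t ih =>
    intro key hex
    have hkl : (pyRot key).length = K := hex.1
    have hrng : ∀ b ∈ List.range' 1 ((pyRot key).length + lock.length - 1),
        1 ≤ b ∧ b < K + lock.length := by
      intro b hbb
      rw [List.mem_range'_1] at hbb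
      omega
    have hmid := midA_eq (pyRot key) lock hex _ hrng
    have hany : (List.range' 1 ((pyRot key).length + lock.length - 1)).any
        (fun b => (List.range' 1 ((pyRot key).length + lock.length - 1)).any
          (fun r => sCheck (pyRot key) lock b r (baseSum lock) == 0))
      = (List.range' 1 ((pyRot key).length + lock.length - 1)).any
        (fun b => (List.range' 1 ((pyRot key).length + lock.length - 1)).any
          (fun r => bCheck (pyRot key) lock b r)) := by
      refine PySem.List.any_congr_mem ?_
      intro b _
      refine PySem.List.any_congr_mem ?_
      intro r _
      exact sCheck_bool (pyRot key) lock hlock b r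
    simp only [outerA, outerB]
    rw [hmid]
    by_cases hc : (List.range' 1 ((pyRot key).length + lock.length - 1)).any
        (fun b => (List.range' 1 ((pyRot key).length + lock.length - 1)).any
          (fun r => bCheck (pyRot key) lock b r)) = true
    · simp [hany, hc]
    · rw [Bool.not_eq_true] at hc
      simp only [hany, hc, Bool.false_eq_true, if_false]
      exact ih (pyRot key) (pyRot_exact hex)

-- degenerate case: the rotated key is empty but the board was built for a non-empty key
theorem zipStar_empty (rows : List (List Int)) (h : [] ∈ rows) :
    zipStar rows = [] := by
  cases rows with
  | nil => rfl
  | cons r0 rest =>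
    cases r0 with
    | nil => rfl
    | cons x xs =>
      have hrest : ([] : List Int) ∈ rest := by
        rcases List.mem_cons.mp h with h1 | h1
        · exact absurd h1.symm (by simp)
        · exact h1
      have hfalse : rest.all (fun r => !r.isEmpty) = false := by
        rw [List.all_eq_false]
        exact ⟨[], hrest, by simp⟩
      show zipGo (x :: xs) rest = []
      rw [zipGo, hfalse]
      simp

theorem sCheck_nil (lock : List (List Int)) (b r : Nat) (base : Int) :
    sCheck [] lock b r base = base := rfl

theorem pick_nil (pad : List (List Int)) (r b : Nat) (att : Bool) :
    pick [] pad r b att = pad := by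
  simp [pick]

theorem innerA_nil (lockLen b : Nat) (pad : List (List Int))
    (hfail : isAllright pad 0 lockLen = false) :
    ∀ rs, innerA [] lockLen b rs pad = some pad := by
  intro rs
  induction rs with
  | nil => rfl
  | cons r rs ih =>
    simp only [innerA, pick_nil, List.length_nil, hfail, Bool.false_eq_true, if_false]
    exact ih

theorem midA_nil (lockLen : Nat) (pad : List (List Int))
    (hfail : isAllright pad 0 lockLen = false) :
    ∀ bs, midA [] lockLen bs pad = some pad := by
  intro bs
  induction bs with
  | nil => rfl
  | cons b bs ih =>
    simp only [midA, List.length_nil, innerA_nil lockLen b pad hfail]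
    exact ih

theorem isAllright_false (pad : List (List Int)) (L : Nat) (hL : 1 ≤ L)
    (h : get2 pad 0 0 ≠ 1) : isAllright pad 0 L = false := by
  unfold isAllright
  rw [List.all_eq_false]
  refine ⟨0, by rw [List.mem_range]; omega, ?_⟩
  simp only [Bool.not_eq_true]
  rw [List.all_eq_false]
  refine ⟨0, by rw [List.mem_range]; omega, ?_⟩
  simpa using h

theorem outerA_false (L : Nat) (pad : List (List Int))
    (h : L = 0 ∨ isAllright pad 0 L = false) :
    ∀ (t : Nat) (key : List (List Int)), pyRot key = [] →
    outerA L t key pad = false := by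
  intro t
  induction t with
  | zero => intro key _; rfl
  | succ t ih =>
    intro key hrot
    simp only [outerA, hrot]
    rcases h with h0 | hfail
    · subst h0
      have hmid : midA [] 0
          (List.range' 1 (List.length ([] : List (List Int)) + 0 - 1)) pad
          = some pad := rfl
      rw [hmid]
      exact ih [] pyRot_nil
    · rw [midA_nil L pad hfail]
      exact ih [] pyRot_nil

theorem outerB_false (lock : List (List Int))
    (h : lock.length ≤ 1 ∨ baseSum lock ≠ 0) :
    ∀ (t : Nat) (key : List (List Int)), pyRot key = [] →
    outerB lock (baseSum lock) t key = false := by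
  intro t
  induction t with
  | zero => intro key _; rfl
  | succ t ih =>
    intro key hrot
    simp only [outerB, hrot, List.length_nil, Nat.zero_add]
    have hfalse : (List.range' 1 (lock.length - 1)).any (fun b =>
        (List.range' 1 (lock.length - 1)).any
          (fun r => sCheck [] lock b r (baseSum lock) == 0)) = false := by
      rcases h with h1 | h1
      · have h0 : lock.length - 1 = 0 := by omega
        rw [h0]
        rfl
      · rw [List.any_eq_false]
        intro b _
        simp only [Bool.not_eq_true]
        rw [List.any_eq_false]
        intro r _
        simp only [Bool.not_eq_true]
        rw [sCheck_nil]
        exact beq_eq_false_iff_ne.mpr h1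
    rw [hfalse]
    simp only [Bool.false_eq_true, if_false]
    exact ih [] pyRot_nil

-- the zero-energy condition in terms of the lock's entries
theorem base_zero_iff (lock : List (List Int))
    (hlock : ∀ r ∈ lock, lock.length ≤ r.length) :
    baseSum lock = 0 ↔ ∀ i < lock.length, ∀ j < lock.length, get2 lock i j = 1 := by
  rw [baseSum_eq lock hlock]
  rw [Finset.sum_eq_zero_iff_of_nonneg
    (fun i _ => Finset.sum_nonneg (fun j _ => sq_nonneg _))]
  constructor
  · intro h i hi j hj
    have h1 := h i (Finset.mem_range.mpr hi)
    rw [Finset.sum_eq_zero_iff_of_nonneg (fun j _ => sq_nonneg _)] at h1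
    have h2 := sq_eq_zero_iff.mp (h1 j (Finset.mem_range.mpr hj))
    omega
  · intro h i hi
    apply Finset.sum_eq_zero
    intro j hj
    rw [Finset.mem_range] at hi hj
    apply sq_eq_zero_iff.mpr
    have := h i hi j hj
    omega

theorem exists_ne_of_not_all (lock : List (List Int))
    (hlock : ∀ r ∈ lock, lock.length ≤ r.length)
    (h : ¬ lock.all (fun row => (row.take lock.length).all (fun v => v == 1)) = true) :
    ∃ i < lock.length, ∃ j < lock.length, get2 lock i j ≠ 1 := by
  rw [Bool.not_eq_true, List.all_eq_false] at h
  obtain ⟨row, hrowmem, hrow⟩ := h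
  rw [Bool.not_eq_true, List.all_eq_false] at hrow
  obtain ⟨v, hvmem, hv⟩ := hrow
  obtain ⟨i, hi, hieq⟩ := List.getElem_of_mem hrowmem
  obtain ⟨j, hj, hjeq⟩ := List.getElem_of_mem hvmem
  have hlen : lock.length ≤ row.length := hlock _ hrowmem
  have hjL : j < lock.length := by
    rw [List.length_take] at hj
    omega
  refine ⟨i, hi, j, hjL, ?_⟩
  have h1 : lock.getD i [] = row := by
    rw [List.getD_eq_getElem?_getD, List.getElem?_eq_getElem hi, Option.getD_some, hieq]
  rw [List.getElem_take] at hjeq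
  have h2 : row.getD j 0 = v := by
    rw [List.getD_eq_getElem?_getD,
      List.getElem?_eq_getElem (show j < row.length by omega), Option.getD_some]
    exact hjeq
  unfold get2
  rw [h1, h2]
  simpa using hv

theorem solution_false_of_emptyrow (key lock : List (List Int)) (hne : key ≠ [])
    (hemp : [] ∈ key) : solution key lock = false := by
  have hrot : pyRot key = [] := zipStar_empty key.reverse (by
    rw [List.mem_reverse]; exact hemp)
  have hK : 1 ≤ key.length := List.length_pos_iff.mpr hne
  unfold solution
  apply outerA_false
  · by_cases hL : lock.length = 0
    · left; exact hL
    · right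
      apply isAllright_false _ _ (by omega)
      rw [(padding_char key.length lock).2]
      rw [if_neg (by omega)]
      omega
  · exact hrot

-- ===== VERDICT (by name: the statement is the Claim_ definition above) =====
theorem solution_spec : Claim_equal_solution := by
  unfold Claim_equal_solution
  intro key lock _ hPre
  unfold Spec_solution
  obtain ⟨hlock, hkey⟩ := hPre
  by_cases hnil : key = []
  · subst hnil
    show outerA lock.length 4 [] (padding 0 lock.length lock)
      = outerB lock (baseSum lock) 4 []
    exact outer_eq lock hlock 4 [] ⟨rfl, by intro r hr; simp [pyRot_nil] at hr⟩
  · by_cases hemp : ([] : List Int) ∈ key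
    · have hrot : pyRot key = [] := zipStar_empty key.reverse (by
        rw [List.mem_reverse]; exact hemp)
      have hnc : ¬(2 ≤ lock.length ∧
          lock.all (fun row => (row.take lock.length).all (fun v => v == 1)) = true) := by
        rcases hkey with h | h | h
        · exact absurd h hnil
        · exact h.2
        · obtain ⟨hge, -⟩ := h
          have h0 := hge [] hemp
          simp at h0
          exact absurd h0 hnil
      rw [solution_false_of_emptyrow key lock hnil hemp]
      have hBfalse : outerB lock (baseSum lock) 4 key = false := by
        refine outerB_false lock ?_ 4 key hrot
        by_cases hL : 2 ≤ lock.length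
        · right
          by_cases hall : lock.all
              (fun row => (row.take lock.length).all (fun v => v == 1)) = true
          · exact absurd ⟨hL, hall⟩ hnc
          · obtain ⟨i, hi, j, hj, hne⟩ := exists_ne_of_not_all lock hlock hall
            intro hb0
            exact hne ((base_zero_iff lock hlock).mp hb0 i hi j hj)
        · left; omega
      exact hBfalse.symm
    · have h3 : (∀ r ∈ key, key.length ≤ r.length) ∧
          ∃ r ∈ key, r.length = key.length := by
        rcases hkey with h | h | h
        · exact absurd h hnil
        · exact absurd h.1 hemp
        · exact h
      exact outer_eq lock hlock 4 key (pyRot_exact_of key hnil h3.1 h3.2)
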